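-- pv_equiv track=rewrite | github.com/matsengrp/larch | data/linearham/make_reference.py | majority_rule_consensus
-- ===== SOURCE A (Python) =====
-- from collections import Counter
--
-- def majority_rule_consensus(sequences):
--     """Create a consensus sequence using majority rule at each position."""
--     if not sequences:
--         return ""
--
--     max_len = max(len(seq) for seq in sequences)
--     consensus = []
--
--     for i in range(max_len):
--         bases = [seq[i] for seq in sequences if i < len(seq)]
--         counter = Counter(bases)
--         most_common = counter.most_common(1)[0][0]
--         consensus.append(most_common)
--
--     return ''.join(consensus)
-- ===== SOURCE B (Python) =====
-- def majority_rule_consensus(sequences):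
--     """Create a consensus sequence using majority rule at each position.
--
--     Single pass over the sequences: build one count table per column while
--     scanning each sequence once, then pick each column's first-seen maximum.
--     """
--     if not sequences:
--         return ""
--
--     col_counters = {}
--     max_len = 0
--     for seq in sequences:
--         if len(seq) > max_len:
--             max_len = len(seq)
--         for i, base in enumerate(seq):
--             if i not in col_counters:
--                 col_counters[i] = {}
--             c = col_counters[i]
--             c[base] = c.get(base, 0) + 1
--
--     out = []
--     for i in range(max_len):
--         best = None
--         for base, cnt in col_counters[i].items():
--             if best is None or cnt > best[1]:
--                 best = (base, cnt)
--         out.append(best[0])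
--     return ''.join(out)
-- ===== Notes on version B (the rewrite author's own statement) =====
-- stated objective: alternative
-- what changed: One pass over the sequences filling per-column count dicts (instead of re-scanning all sequences for every column and building a Counter per column), then one scan of each column dict for its first-seen maximum.
import Mathlib
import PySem

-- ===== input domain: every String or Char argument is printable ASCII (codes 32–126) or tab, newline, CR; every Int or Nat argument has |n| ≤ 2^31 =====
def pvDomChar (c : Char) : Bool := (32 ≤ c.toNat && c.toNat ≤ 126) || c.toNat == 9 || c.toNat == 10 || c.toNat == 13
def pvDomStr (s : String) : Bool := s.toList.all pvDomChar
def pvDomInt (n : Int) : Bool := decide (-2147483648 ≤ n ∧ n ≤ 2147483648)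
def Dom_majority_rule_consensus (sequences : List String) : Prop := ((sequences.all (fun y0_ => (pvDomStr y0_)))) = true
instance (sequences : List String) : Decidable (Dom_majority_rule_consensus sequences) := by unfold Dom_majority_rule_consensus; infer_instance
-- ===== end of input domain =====

-- B is a one-pass re-implementation (per-column count dicts filled while scanning each
-- sequence once) of A's column-by-column Counter scan; equal return value on all inputs.

-- ===== PORT A =====
def majority_rule_consensus (sequences : List String) : String :=
  if sequences = [] then "" else
  -- max(len(seq) for seq in sequences); the generator is nonempty here, so getD 0 is never used
  let maxLen : Int := (PySem.List.max? (sequences.map (fun seq => PySem.Str.len seq)) (fun x => x)).getD 0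
  let consensus : List Char :=
    (PySem.List.pyRange 0 maxLen 1).foldl (fun acc i =>
      let bases := sequences.filterMap (fun seq =>
        if i < PySem.Str.len seq then PySem.Str.pyGet? seq i else none)
      let counter := PySem.Dict.counter bases
      -- counter.most_common(1)[0][0] = first key of maximal count; bases is nonempty
      -- for every i < maxLen, so the `none` arm is unreachable
      match PySem.List.max? counter.items (fun p => p.2) with
      | some p => acc ++ [p.1]
      | none => acc) []
  String.ofList consensus

-- ===== PORT B =====
-- c[base] = c.get(base, 0) + 1
def pvAddBase (c : PySem.Dict Char Int) (b : Char) : PySem.Dict Char Int :=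
  c.insert b (c.getD b 0 + 1)

-- one (i, base) update of col_counters (col_counters[i] defaults to {} when absent)
def pvAddCol (d : PySem.Dict Int (PySem.Dict Char Int)) (ib : Int × Char) :
    PySem.Dict Int (PySem.Dict Char Int) :=
  d.insert ib.1 (pvAddBase (d.getD ib.1 PySem.Dict.empty) ib.2)

def majority_rule_consensus_alt (sequences : List String) : String :=
  if sequences = [] then "" else
  let st : Int × PySem.Dict Int (PySem.Dict Char Int) :=
    sequences.foldl (fun st seq =>
      let m := if PySem.Str.len seq > st.1 then PySem.Str.len seq else st.1
      (PySem.List.enumerate seq.toList).foldl (fun st ib => (st.1, pvAddCol st.2 ib)) (m, st.2))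
      (0, PySem.Dict.empty)
  let out : List Char :=
    (PySem.List.pyRange 0 st.1 1).foldl (fun acc i =>
      -- col_counters[i] exists for every i < max_len, so getD's default is unreachable
      let best := (st.2.getD i PySem.Dict.empty).items.foldl (fun best p =>
        match best with
        | none => some p
        | some q => if p.2 > q.2 then some p else some q) none
      match best with
      | some p => acc ++ [p.1]
      | none => acc) []
  String.ofList out

-- ===== PRECONDITION & SPEC =====
def Spec_majority_rule_consensus (sequences : List String) (out : String) : Prop := out = majority_rule_consensus_alt sequences
instance (sequences : List String) (out : String) : Decidable (Spec_majority_rule_consensus sequences out) := by unfold Spec_majority_rule_consensus; infer_instance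

-- ===== CLAIM (what is proved, stated in full; the proofs are below) =====
def Claim_equal_majority_rule_consensus : Prop := ∀ (sequences : List String), Dom_majority_rule_consensus sequences → Spec_majority_rule_consensus sequences (majority_rule_consensus sequences)

-- ===== LEMMAS AND PROOFS =====

-- B's inner fold keeps the running max and only updates the column dicts
lemma pv_inner_pair (ps : List (Int × Char)) (m : Int)
    (d : PySem.Dict Int (PySem.Dict Char Int)) :
    ps.foldl (fun st ib => (st.1, pvAddCol st.2 ib)) (m, d) = (m, ps.foldl pvAddCol d) := by
  induction ps generalizing d with
  | nil => rfl
  | cons p ps ih => simpa using ih (pvAddCol d p)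

-- B's outer fold splits into the running-max fold and the column fold
lemma pv_outer_pair (seqs : List String) (m : Int)
    (d : PySem.Dict Int (PySem.Dict Char Int)) :
    seqs.foldl (fun st seq =>
      let mm := if PySem.Str.len seq > st.1 then PySem.Str.len seq else st.1
      (PySem.List.enumerate seq.toList).foldl (fun st ib => (st.1, pvAddCol st.2 ib)) (mm, st.2)) (m, d)
    = (seqs.foldl (fun m s => if PySem.Str.len s > m then PySem.Str.len s else m) m,
       seqs.foldl (fun d s => (PySem.List.enumerate s.toList).foldl pvAddCol d) d) := by
  induction seqs generalizing m d with
  | nil => rfl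
  | cons s ss ih =>
    simp only [List.foldl_cons]
    rw [pv_inner_pair]
    exact ih _ _

-- B's running max equals A's max(len(seq) …) on a nonempty list
lemma pv_maxlen (s : String) (ss : List String) :
    (s :: ss).foldl (fun m t => if PySem.Str.len t > m then PySem.Str.len t else m) 0
    = (PySem.List.max? ((s :: ss).map (fun seq => PySem.Str.len seq)) (fun x => x)).getD 0 := by
  have hstep : ∀ (m : Int) (t : String),
      (if PySem.Str.len t > m then PySem.Str.len t else m) = max m (PySem.Str.len t) := by
    intro m t
    simp only [gt_iff_lt, max_def]
    split_ifs <;> omega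
  simp only [List.map_cons, PySem.List.max?_id_cons, Option.getD_some, List.foldl_cons, hstep]
  rw [List.foldl_map, max_eq_right (by simp [PySem.Str.len] : (0 : Int) ≤ PySem.Str.len s)]

-- guarded seq[i] in A's comprehension is plain optional indexing for 0 ≤ i
lemma pv_guarded_get (s : String) (i : Int) (h : 0 ≤ i) :
    (if i < PySem.Str.len s then PySem.Str.pyGet? s i else none) = s.toList[i.toNat]? := by
  by_cases hlt : i < PySem.Str.len s
  · rw [if_pos hlt]
    have hi : i = ((i.toNat : Nat) : Int) := by omega
    rw [hi]
    simp [pysem]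
  · rw [if_neg hlt]
    symm
    rw [List.getElem?_eq_none]
    simp only [PySem.Str.len, not_lt] at hlt
    omega

-- the entries of enumerate falling on column i
lemma pv_enum_filter (cs : List Char) (start i : Int) :
    ((PySem.List.enumerate cs start).filter (fun p => p.1 == i)).map (·.2)
    = if start ≤ i then (cs[(i - start).toNat]?).toList else [] := by
  induction cs generalizing start with
  | nil => simp [PySem.List.enumerate]
  | cons x cs ih =>
    simp only [PySem.List.enumerate_cons, List.filter_cons]
    by_cases hsi : start = i
    · subst hsi
      have h2 : ¬ (start + 1 ≤ start) := by omega
      simp [ih (start + 1), h2]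
    · have hbeq : ((start, x).1 == i) = false := by simpa using hsi
      simp only [hbeq, Bool.false_eq_true, if_false, ih (start + 1)]
      by_cases hle : start + 1 ≤ i
      · have hle' : start ≤ i := by omega
        have ht : (i - start).toNat = (i - (start + 1)).toNat + 1 := by omega
        simp [hle, hle', ht]
      · have hgt : ¬ start ≤ i := by omega
        simp [hle, hgt]

-- a single column of the inner fold
lemma pv_inner_col (ps : List (Int × Char)) (d : PySem.Dict Int (PySem.Dict Char Int)) (i : Int) :
    (ps.foldl pvAddCol d).getD i PySem.Dict.empty
    = ((ps.filter (fun p => p.1 == i)).map (·.2)).foldl pvAddBase (d.getD i PySem.Dict.empty) := by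
  induction ps generalizing d with
  | nil => rfl
  | cons p ps ih =>
    obtain ⟨j, b⟩ := p
    simp only [List.foldl_cons, List.filter_cons]
    rw [ih]
    by_cases hji : j = i
    · subst hji
      simp [pvAddCol]
    · have hbeq : ((j, b).1 == i) = false := by simpa using hji
      rw [hbeq]
      simp [pvAddCol, PySem.Dict.getD_insert, Ne.symm hji]

-- a single column of B's whole counting pass = A's per-column bases, folded
lemma pv_outer_col (seqs : List String) (d : PySem.Dict Int (PySem.Dict Char Int))
    (i : Int) (h : 0 ≤ i) :
    (seqs.foldl (fun d s => (PySem.List.enumerate s.toList).foldl pvAddCol d) d).getD i PySem.Dict.empty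
    = (seqs.filterMap (fun s => s.toList[i.toNat]?)).foldl pvAddBase (d.getD i PySem.Dict.empty) := by
  induction seqs generalizing d with
  | nil => rfl
  | cons s ss ih =>
    simp only [List.foldl_cons, List.filterMap_cons]
    rw [ih, pv_inner_col, pv_enum_filter]
    rw [if_pos h, sub_zero]
    cases hopt : s.toList[i.toNat]? with
    | none => simp
    | some b => simp

-- B's explicit first-strict-max scan of the items is max(items, key=count)
lemma pv_best_eq (l : List (Char × Int)) :
    l.foldl (fun best p => match best with
      | none => some p
      | some q => if p.2 > q.2 then some p else some q) none
    = PySem.List.max? l (fun p => p.2) := by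
  unfold PySem.List.max?
  apply PySem.List.foldl_congr_mem
  intro acc x _
  cases acc <;> simp [gt_iff_lt]

-- folding pvAddBase from the empty dict is Counter(xs)
lemma pv_addBase_counter (xs : List Char) :
    xs.foldl pvAddBase PySem.Dict.empty = PySem.Dict.counter xs :=
  PySem.Dict.foldl_insert_getD_add_one_eq_counter xs

-- ===== VERDICT (by name: the statement is the Claim_ definition above) =====
theorem majority_rule_consensus_spec : Claim_equal_majority_rule_consensus := by
  intro seqs _
  unfold Spec_majority_rule_consensus majority_rule_consensus majority_rule_consensus_alt
  by_cases hnil : seqs = []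
  · simp [hnil]
  · rw [if_neg hnil, if_neg hnil]
    simp only []
    rw [pv_outer_pair]
    obtain ⟨s, ss, rfl⟩ := List.exists_cons_of_ne_nil hnil
    rw [← pv_maxlen]
    congr 1
    apply PySem.List.foldl_congr_mem
    intro acc i hi
    have h0 : 0 ≤ i := (PySem.List.mem_pyRange_one.1 hi).1
    rw [pv_outer_col _ _ _ h0]
    have hb : (fun (seq : String) => if i < PySem.Str.len seq then PySem.Str.pyGet? seq i else none)
            = (fun (s : String) => s.toList[i.toNat]?) := funext fun s => pv_guarded_get s i h0
    rw [hb]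
    rw [show (PySem.Dict.empty : PySem.Dict Int (PySem.Dict Char Int)).getD i PySem.Dict.empty
          = PySem.Dict.empty from rfl]
    rw [pv_addBase_counter, pv_best_eq]
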